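-- pv_equiv track=rewrite | github.com/cainafigueiredo/Avoado | src/featureExtraction.py | generateBoWVectorOfDocument
-- ===== SOURCE A (Python) =====
-- def generateBoWVectorOfDocument(vocabulary, document):
--     """
--     Description
--     ===========
--         It receives a vocabulary and a document and then it generates the Bag-of-Words vector for
--         this document.
--
--     Parameters
--     ==========
--         - vocabulary: a set containing all words that occur in corpus
--         - document: a list of tokens.
--
--     Results
--     =======
--     return:
--         - dict: a dictionary with words as keys and words counts as values.
--     """
--     countVector = dict.fromkeys(vocabulary,0)
--     for word in document:
--         try:
--             countVector[word] += 1
--         except: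
--             continue
--     return countVector
-- ===== SOURCE B (Python) =====
-- def generateBoWVectorOfDocument(vocabulary, document):
--     counts = {}
--     for word in document:
--         counts[word] = counts.get(word, 0) + 1
--     return {word: counts.get(word, 0) for word in vocabulary}
-- ===== Notes on version B (the rewrite author's own statement) =====
-- stated objective: alternative
-- what changed: B builds a frequency table of the whole document first and then projects it onto the vocabulary with a dict comprehension, instead of A's zero-initialised vocabulary dict incremented under try/except while scanning the document.
import Mathlib
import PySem

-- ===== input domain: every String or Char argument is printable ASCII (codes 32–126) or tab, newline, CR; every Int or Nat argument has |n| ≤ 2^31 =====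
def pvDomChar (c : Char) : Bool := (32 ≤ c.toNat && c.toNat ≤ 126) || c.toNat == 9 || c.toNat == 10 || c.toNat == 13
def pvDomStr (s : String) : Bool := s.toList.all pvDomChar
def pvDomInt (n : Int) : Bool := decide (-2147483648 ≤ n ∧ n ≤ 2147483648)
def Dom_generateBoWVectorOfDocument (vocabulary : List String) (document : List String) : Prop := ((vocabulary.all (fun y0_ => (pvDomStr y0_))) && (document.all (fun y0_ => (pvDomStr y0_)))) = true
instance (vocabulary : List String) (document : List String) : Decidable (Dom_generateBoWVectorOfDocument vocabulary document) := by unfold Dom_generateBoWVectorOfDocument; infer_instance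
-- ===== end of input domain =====

-- ===== PORT A =====
-- A: countVector = dict.fromkeys(vocabulary, 0); for word in document: try countVector[word] += 1 except: continue
def generateBoWVectorOfDocument (vocabulary : List String) (document : List String) : List (String × Int) :=
  let countVector := vocabulary.foldl (fun d w => d.insert w (0 : Int)) PySem.Dict.empty
  let countVector := document.foldl
    (fun d word =>
      match d.get? word with          -- countVector[word] += 1; KeyError is caught → continue
      | some v => d.insert word (v + 1)
      | none => d) countVector
  countVector.items

-- ===== PORT B =====
-- B: counts = {}; for word in document: counts[word] = counts.get(word, 0) + 1;
--    return {word: counts.get(word, 0) for word in vocabulary}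
def generateBoWVectorOfDocument_alt (vocabulary : List String) (document : List String) : List (String × Int) :=
  let counts := document.foldl (fun d word => d.insert word (d.getD word 0 + 1)) PySem.Dict.empty
  (vocabulary.foldl (fun d word => d.insert word (counts.getD word 0)) PySem.Dict.empty).items

-- ===== PRECONDITION & SPEC =====
def Spec_generateBoWVectorOfDocument (vocabulary : List String) (document : List String) (out : List (String × Int)) : Prop := out = generateBoWVectorOfDocument_alt vocabulary document
instance (vocabulary : List String) (document : List String) (out : List (String × Int)) : Decidable (Spec_generateBoWVectorOfDocument vocabulary document out) := by unfold Spec_generateBoWVectorOfDocument; infer_instance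

-- ===== CLAIM (what is proved, stated in full; the proofs are below) =====
def Claim_equal_generateBoWVectorOfDocument : Prop := ∀ (vocabulary : List String) (document : List String), Dom_generateBoWVectorOfDocument vocabulary document → Spec_generateBoWVectorOfDocument vocabulary document (generateBoWVectorOfDocument vocabulary document)

-- ===== LEMMAS AND PROOFS =====

-- A dict built by inserting (w, g w) for each w of l has items = keys.map (k, g k), provided it started that way.
theorem insert_fun_items (l : List String) (g : String → Int) (d : PySem.Dict String Int)
    (hd : d.items = d.keys.map (fun k => (k, g k))) :
    (l.foldl (fun d w => d.insert w (g w)) d).items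
      = (PySem.Set.update d.keys l).map (fun k => (k, g k)) := by
  induction l generalizing d with
  | nil => simpa [PySem.Set.update_nil] using hd
  | cons w rest ih =>
    simp only [List.foldl_cons, PySem.Set.update_cons]
    by_cases hc : d.contains w = true
    · have hkeys : (d.insert w (g w)).keys = d.keys :=
        PySem.Dict.keys_insert_of_contains d (g w) hc
      have hadd : PySem.Set.add d.keys w = d.keys := by
        have hw : w ∈ d.keys := (PySem.Dict.contains_iff_mem_keys d w).mp hc
        simp [PySem.Set.add, hw]
      rw [ih (d.insert w (g w)) ?_, hkeys, hadd]
      rw [PySem.Dict.items_insert_of_contains d (g w) hc, hd, List.map_map, hkeys]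
      apply List.map_congr_left
      intro k _
      by_cases hkw : k = w <;> simp [hkw]
    · have hc' : d.contains w = false := by simpa using hc
      have hkeys : (d.insert w (g w)).keys = d.keys ++ [w] :=
        PySem.Dict.keys_insert_of_not_contains d (g w) hc'
      have hadd : PySem.Set.add d.keys w = d.keys ++ [w] := by
        have hw : w ∉ d.keys := by
          intro hmem
          simp [(PySem.Dict.contains_iff_mem_keys d w).mpr hmem] at hc'
        simp [PySem.Set.add, hw]
      rw [ih (d.insert w (g w)) ?_, hkeys, hadd]
      rw [PySem.Dict.items_insert_of_not_contains d (g w) hc', hd, hkeys]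
      simp

-- A's document loop: each stored value grows by the number of occurrences of its key in the document.
theorem loopA_items (doc : List String) (d : PySem.Dict String Int) (hnd : d.keys.Nodup) :
    (doc.foldl
        (fun d word =>
          match d.get? word with
          | some v => d.insert word (v + 1)
          | none => d) d).items
      = d.items.map (fun p => (p.1, p.2 + (doc.count p.1 : Int))) := by
  induction doc generalizing d with
  | nil => simp
  | cons w rest ih =>
    simp only [List.foldl_cons]
    cases hg : d.get? w with
    | none =>
      have hred : (match (none : Option Int) with
        | some v => d.insert w (v + 1) | none => d) = d := rfl
      rw [hred, ih d hnd]
      apply List.map_congr_left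
      intro p hp
      have hpw : p.1 ≠ w := by
        intro h
        have : p.1 ∈ d.keys := PySem.Dict.mem_keys_of_mem_items d hp
        rw [h] at this
        rw [PySem.Dict.get?_eq_none_iff_not_mem_keys] at hg
        exact hg this
      have hpw' : w ≠ p.1 := fun h => hpw h.symm
      simp [hpw']
    | some v =>
      have hred : (match (some v : Option Int) with
        | some v => d.insert w (v + 1) | none => d) = d.insert w (v + 1) := rfl
      rw [hred]
      have hc : d.contains w = true := by
        rw [PySem.Dict.contains_eq_isSome_get?, hg]; rfl
      have hnd' : (d.insert w (v + 1)).keys.Nodup := PySem.Dict.nodup_keys_insert d w (v + 1) hnd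
      rw [ih _ hnd', PySem.Dict.items_insert_of_contains d (v + 1) hc, List.map_map]
      apply List.map_congr_left
      intro p hp
      by_cases hpw : p.1 = w
      · have hpv : p.2 = v := by
          have := PySem.Dict.get?_of_mem_items d (by simpa using hp : (p.1, p.2) ∈ d.items) hnd
          rw [hpw, hg] at this
          exact (Option.some.inj this).symm
        simp only [Function.comp, hpw, beq_self_eq_true, if_pos]
        refine Prod.ext rfl ?_
        simp [hpv]
        ring
      · simp only [Function.comp]
        rw [if_neg (by simpa using hpw)]
        have hpw' : w ≠ p.1 := fun h => hpw h.symm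
        simp [hpw']

-- ===== VERDICT (by name: the statement is the Claim_ definition above) =====
theorem generateBoWVectorOfDocument_spec : Claim_equal_generateBoWVectorOfDocument := by
  intro vocabulary document _
  show generateBoWVectorOfDocument vocabulary document = generateBoWVectorOfDocument_alt vocabulary document
  unfold generateBoWVectorOfDocument generateBoWVectorOfDocument_alt
  have hcounter : document.foldl (fun d word => d.insert word (d.getD word 0 + 1)) PySem.Dict.empty
      = PySem.Dict.counter document :=
    PySem.Dict.foldl_insert_getD_add_one_eq_counter document
  rw [hcounter]
  have hB :
      (vocabulary.foldl (fun d word => d.insert word ((PySem.Dict.counter document).getD word 0)) PySem.Dict.empty).items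
        = (PySem.Set.ofList vocabulary).map
            (fun k => (k, (PySem.Dict.counter document).getD k 0)) := by
    have := insert_fun_items vocabulary (fun w => (PySem.Dict.counter document).getD w 0)
      PySem.Dict.empty (by rfl)
    simpa [PySem.Set.update_nil_left] using this
  have hA0 :
      (vocabulary.foldl (fun d w => d.insert w (0 : Int)) PySem.Dict.empty).items
        = (PySem.Set.ofList vocabulary).map (fun k => (k, (0 : Int))) := by
    have := insert_fun_items vocabulary (fun _ => (0 : Int)) PySem.Dict.empty (by rfl)
    simpa [PySem.Set.update_nil_left] using this
  have hA0nd : (vocabulary.foldl (fun d w => d.insert w (0 : Int)) PySem.Dict.empty).keys.Nodup :=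
    PySem.Dict.nodup_keys_foldl_insert vocabulary _ PySem.Dict.empty (List.nodup_nil)
  rw [loopA_items document _ hA0nd, hA0, hB, List.map_map]
  apply List.map_congr_left
  intro k _
  simp [PySem.Dict.getD_counter]
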